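-- pv_equiv track=rewrite | github.com/kugiyasan/SenPy | cogs/mastermind.py | toEmoji
-- ===== SOURCE A (Python) =====
-- def toEmoji(string):
--     if type(string) == list:
--         string = ''.join(str(i) for i in string)
--
--     return (string.replace('1', ':red_circle:')
--                 .replace('2', ':orange_circle:')
--                 .replace('3', ':yellow_circle:')
--                 .replace('4', ':green_circle:')
--                 .replace('5', ':blue_circle:')
--                 .replace('6', ':purple_circle:'))
-- ===== SOURCE B (Python) =====
-- _EMOJI = {'1': ':red_circle:', '2': ':orange_circle:', '3': ':yellow_circle:',
--           '4': ':green_circle:', '5': ':blue_circle:', '6': ':purple_circle:'}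
--
--
-- def toEmoji(string):
--     if type(string) == list:
--         string = ''.join(str(i) for i in string)
--
--     return ''.join(_EMOJI.get(c, c) for c in string)
-- ===== Notes on version B (the rewrite author's own statement) =====
-- stated objective: simpler
-- what changed: Replaces the chain of six sequential full-string .replace passes by a single pass over the characters with one digit-to-emoji lookup table (valid because no replacement string contains a digit, so the replaces never cascade).
import Mathlib
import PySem

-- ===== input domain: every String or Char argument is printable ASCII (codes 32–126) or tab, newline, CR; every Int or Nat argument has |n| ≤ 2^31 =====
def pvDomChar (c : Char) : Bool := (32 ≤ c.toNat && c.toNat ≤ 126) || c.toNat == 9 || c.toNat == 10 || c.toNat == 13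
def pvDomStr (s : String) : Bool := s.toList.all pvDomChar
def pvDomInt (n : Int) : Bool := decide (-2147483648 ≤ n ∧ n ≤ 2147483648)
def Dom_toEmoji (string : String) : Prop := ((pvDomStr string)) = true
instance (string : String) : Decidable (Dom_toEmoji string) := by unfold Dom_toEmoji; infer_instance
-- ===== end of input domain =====

-- B replaces A's six sequential full-string .replace passes by one pass with a digit→emoji
-- lookup table (objective: simpler). The list branch of the Python is unreachable for the
-- String-typed argument and has no counterpart here.

-- ===== PORT A =====
def toEmoji (string : String) : String :=
  PySem.Str.replace (PySem.Str.replace (PySem.Str.replace (PySem.Str.replace (PySem.Str.replace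
    (PySem.Str.replace string "1" ":red_circle:") "2" ":orange_circle:")
    "3" ":yellow_circle:") "4" ":green_circle:") "5" ":blue_circle:") "6" ":purple_circle:"

-- ===== PORT B =====
def pvEmojiMap : PySem.Dict Char String :=
  PySem.Dict.mk [('1', ":red_circle:"), ('2', ":orange_circle:"), ('3', ":yellow_circle:"),
                 ('4', ":green_circle:"), ('5', ":blue_circle:"), ('6', ":purple_circle:")]

def toEmoji_alt (string : String) : String :=
  PySem.Str.join "" (string.toList.map (fun c => pvEmojiMap.getD c (String.singleton c)))

-- ===== PRECONDITION & SPEC =====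
def Spec_toEmoji (string : String) (out : String) : Prop := out = toEmoji_alt string
instance (string : String) (out : String) : Decidable (Spec_toEmoji string out) := by unfold Spec_toEmoji; infer_instance

-- ===== CLAIM (what is proved, stated in full; the proofs are below) =====
def Claim_equal_toEmoji : Prop := ∀ (string : String), Dom_toEmoji string → Spec_toEmoji string (toEmoji string)

-- ===== LEMMAS AND PROOFS =====

/-- the per-character mapping both programs compute -/
def pvRhs (c : Char) : List Char :=
  if c = '1' then ":red_circle:".toList else
  if c = '2' then ":orange_circle:".toList else
  if c = '3' then ":yellow_circle:".toList else
  if c = '4' then ":green_circle:".toList else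
  if c = '5' then ":blue_circle:".toList else
  if c = '6' then ":purple_circle:".toList else [c]

theorem pv_go_single (d : Char) (new : List Char) :
    ∀ (fuel : Nat) (l acc : List Char), l.length ≤ fuel →
      PySem.Chars.replace.go [d] new fuel l acc =
        acc.reverse ++ l.flatMap (fun c => if c = d then new else [c]) := by
  intro fuel
  induction fuel with
  | zero =>
    intro l acc h
    have : l = [] := List.eq_nil_of_length_eq_zero (Nat.le_zero.mp h)
    subst this; simp [PySem.Chars.replace.go]
  | succ n ih =>
    intro l acc h
    cases l with
    | nil => simp [PySem.Chars.replace.go]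
    | cons c t =>
      simp only [PySem.Chars.replace.go, List.isPrefixOf]
      by_cases hc : d = c
      · subst hc
        simp only [BEq.rfl, Bool.true_and, if_true,
                   List.length_cons, List.length_nil,
                   List.drop_succ_cons, List.drop_zero]
        rw [ih t (new.reverse ++ acc) (by simpa using h)]
        simp
      · have hb : (d == c) = false := by simpa using hc
        simp only [hb, Bool.false_and]
        rw [ih t (c :: acc) (by simpa using h)]
        have hcd : ¬ c = d := fun hh => hc hh.symm
        simp [hcd]

theorem pv_replace_single (d : Char) (new l : List Char) :
    PySem.Chars.replace l [d] new = l.flatMap (fun c => if c = d then new else [c]) := by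
  rw [PySem.Chars.replace]
  simp only [List.isEmpty, if_false, reduceCtorEq]
  simpa using pv_go_single d new l.length l [] le_rfl

theorem pv_flatMap_flatMap (l : List Char) (f h : Char → List Char) :
    (l.flatMap f).flatMap h = l.flatMap (fun c => (f c).flatMap h) := by
  induction l with
  | nil => rfl
  | cons c t ih => simp [List.flatMap_cons, ih]

theorem pv_A_chain (s : String) :
    toEmoji s = String.ofList (s.toList.flatMap pvRhs) := by
  unfold toEmoji
  simp only [PySem.Str.replace, String.toList_ofList]
  congr 1
  have e1 : ("1" : String).toList = ['1'] := by decide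
  have e2 : ("2" : String).toList = ['2'] := by decide
  have e3 : ("3" : String).toList = ['3'] := by decide
  have e4 : ("4" : String).toList = ['4'] := by decide
  have e5 : ("5" : String).toList = ['5'] := by decide
  have e6 : ("6" : String).toList = ['6'] := by decide
  rw [e1, e2, e3, e4, e5, e6]
  rw [pv_replace_single, pv_replace_single, pv_replace_single, pv_replace_single,
      pv_replace_single, pv_replace_single]
  rw [pv_flatMap_flatMap, pv_flatMap_flatMap, pv_flatMap_flatMap, pv_flatMap_flatMap,
      pv_flatMap_flatMap]
  apply List.flatMap_congr  -- pointwise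
  intro c _
  by_cases h1 : c = '1'; · subst h1; decide
  by_cases h2 : c = '2'; · subst h2; decide
  by_cases h3 : c = '3'; · subst h3; decide
  by_cases h4 : c = '4'; · subst h4; decide
  by_cases h5 : c = '5'; · subst h5; decide
  by_cases h6 : c = '6'; · subst h6; decide
  simp [pvRhs, h1, h2, h3, h4, h5, h6]

theorem pv_join_empty (css : List (List Char)) :
    PySem.Chars.join [] css = css.flatten := by
  induction css with
  | nil => rfl
  | cons c t ih =>
    cases t with
    | nil => simp [PySem.Chars.join, List.intercalate]
    | cons d u =>
      simp only [PySem.Chars.join, List.intercalate] at *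
      simp [List.intersperse] at *
      simpa using ih

theorem pv_B_pointwise (c : Char) :
    (pvEmojiMap.getD c (String.singleton c)).toList = pvRhs c := by
  by_cases h1 : c = '1'; · subst h1; decide
  by_cases h2 : c = '2'; · subst h2; decide
  by_cases h3 : c = '3'; · subst h3; decide
  by_cases h4 : c = '4'; · subst h4; decide
  by_cases h5 : c = '5'; · subst h5; decide
  by_cases h6 : c = '6'; · subst h6; decide
  have b1 : ('1' == c) = false := beq_eq_false_iff_ne.mpr (fun hh => h1 hh.symm)
  have b2 : ('2' == c) = false := beq_eq_false_iff_ne.mpr (fun hh => h2 hh.symm)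
  have b3 : ('3' == c) = false := beq_eq_false_iff_ne.mpr (fun hh => h3 hh.symm)
  have b4 : ('4' == c) = false := beq_eq_false_iff_ne.mpr (fun hh => h4 hh.symm)
  have b5 : ('5' == c) = false := beq_eq_false_iff_ne.mpr (fun hh => h5 hh.symm)
  have b6 : ('6' == c) = false := beq_eq_false_iff_ne.mpr (fun hh => h6 hh.symm)
  simp only [pvEmojiMap, PySem.Dict.getD_eq_get?_getD, PySem.Dict.get?_mk_cons,
             b1, b2, b3, b4, b5, b6]
  simp only [pvRhs, h1, h2, h3, h4, h5, h6, if_false]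
  simp [PySem.Dict.get?, String.singleton]

theorem pv_B_chain (s : String) :
    toEmoji_alt s = String.ofList (s.toList.flatMap pvRhs) := by
  unfold toEmoji_alt
  rw [PySem.Str.join]
  congr 1
  have : (("" : String).toList) = ([] : List Char) := rfl
  rw [this, pv_join_empty]
  rw [List.map_map, List.flatten_eq_flatMap, List.flatMap_map]
  apply List.flatMap_congr
  intro c _
  exact pv_B_pointwise c

-- ===== VERDICT (by name: the statement is the Claim_ definition above) =====
theorem toEmoji_spec : Claim_equal_toEmoji := by
  intro s _
  unfold Spec_toEmoji
  rw [pv_A_chain, pv_B_chain]
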